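-- pv_equiv track=rewrite | github.com/Computer-Science-Club-SCSU-University/byteme | calvin/testfolder/testconvert.py | splitAlpha
-- ===== SOURCE A (Python) =====
-- def splitAlpha(string):
--     courses = []
--     codes = []
--     alpha = ""
--     integer = ""
--
--     for item in string:
--         if item.isalpha():
--             alpha += item
--         else:
--             if alpha:
--                 courses.append(alpha)
--                 alpha = ""
--
--             if not (len(integer) >= 3):
--                 integer += item
--
--             else:
--                 codes.append(integer)
--                 integer = item
--
--     if integer and integer not in codes:
--         codes.append(integer)
--
--     return {"course": courses, "code": codes}
-- ===== SOURCE B (Python) =====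
-- def splitAlpha(string):
--     # courses: each maximal letter run terminated by a non-letter character
--     courses = []
--     start = 0
--     for i, c in enumerate(string):
--         if not c.isalpha():
--             if start < i:
--                 courses.append(string[start:i])
--             start = i + 1
--     # codes: the non-letter characters, in order, grouped into chunks of three
--     digits = "".join(c for c in string if not c.isalpha())
--     codes = [digits[i:i+3] for i in range(0, len(digits), 3)]
--     return {"course": courses, "code": codes}
-- ===== Notes on version B (the rewrite author's own statement) =====
-- stated objective: simpler
-- what changed: A's single character loop with four mutable accumulators is replaced by an index scan that slices each letter run out of the string when a non-letter terminates it, plus a comprehension that groups the non-letter characters into stride-3 chunks; B applies no dedup to the final chunk.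
-- intended difference: On strings whose non-letter characters, grouped into stride-3 chunks, end in a chunk equal to an earlier chunk, A silently drops that final code (it deduplicates only the very last chunk), while B keeps every chunk; keeping all chunks is intended since A itself keeps duplicates everywhere else. — e.g. on splitAlpha("123123"): A returns [("course", []), ("code", ["123"])], B returns [("course", []), ("code", ["123", "123"])]
import Mathlib
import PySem

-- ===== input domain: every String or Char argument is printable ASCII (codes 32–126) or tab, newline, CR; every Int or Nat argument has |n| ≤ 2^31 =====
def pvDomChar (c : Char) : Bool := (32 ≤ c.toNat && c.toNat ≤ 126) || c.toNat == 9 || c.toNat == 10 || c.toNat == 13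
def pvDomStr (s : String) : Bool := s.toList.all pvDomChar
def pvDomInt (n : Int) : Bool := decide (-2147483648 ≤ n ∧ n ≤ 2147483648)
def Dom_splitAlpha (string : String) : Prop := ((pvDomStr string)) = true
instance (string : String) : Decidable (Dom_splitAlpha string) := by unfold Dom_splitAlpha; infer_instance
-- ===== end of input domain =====

-- B replaces A's four-accumulator character loop by an index scan slicing out terminated
-- letter runs and a stride-3 chunking comprehension (objective: simpler); B keeps a final
-- code chunk that duplicates an earlier one, where A drops it (see D_ below).

-- ===== PORT A =====
-- state = (courses, codes, alpha, integer); strings accumulated as List Char, joined to String at the end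
def pvStepA (st : List (List Char) × List (List Char) × List Char × List Char) (item : Char) :
    List (List Char) × List (List Char) × List Char × List Char :=
  let courses := st.1
  let codes := st.2.1
  let alpha := st.2.2.1
  let integer := st.2.2.2
  if PySem.Chars.isalpha item then (courses, codes, alpha ++ [item], integer)
  else
    let courses' := if alpha ≠ [] then courses ++ [alpha] else courses
    let alpha' : List Char := if alpha ≠ [] then [] else alpha
    if ¬ (integer.length ≥ 3) then (courses', codes, alpha', integer ++ [item])
    else (courses', codes ++ [integer], alpha', [item])

def splitAlpha (string : String) : List (String × List String) :=
  let st := string.toList.foldl pvStepA ([], [], [], [])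
  let courses := st.1
  let codes := st.2.1
  let integer := st.2.2.2
  let codes' := if integer ≠ [] ∧ integer ∉ codes then codes ++ [integer] else codes
  [("course", courses.map String.ofList), ("code", codes'.map String.ofList)]

-- ===== PORT B =====
-- state = (courses, start); the loop body of Source B, over enumerate(string)
def pvStepB (cs : List Char) (st : List (List Char) × Int) (p : Int × Char) :
    List (List Char) × Int :=
  if ¬ PySem.Chars.isalpha p.2 then
    ((if st.2 < p.1 then st.1 ++ [PySem.List.slice cs (some st.2) (some p.1)] else st.1), p.1 + 1)
  else st

def splitAlpha_alt (string : String) : List (String × List String) :=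
  let cs := string.toList
  let courses := ((PySem.List.enumerate cs 0).foldl (pvStepB cs) ([], 0)).1
  let digits := cs.filter (fun c => !PySem.Chars.isalpha c)
  let codes := (PySem.List.pyRange 0 (digits.length : Int) 3).map
    (fun i => PySem.List.slice digits (some i) (some (i + 3)))
  [("course", courses.map String.ofList), ("code", codes.map String.ofList)]

-- ===== PRECONDITION & SPEC =====
-- On strings whose non-letter characters, grouped into stride-3 chunks, end in a chunk equal
-- to an earlier chunk, A silently drops that final code (it deduplicates only the very last
-- chunk) while B keeps every chunk; keeping all chunks is intended since A itself keeps
-- duplicates everywhere else.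
def D_splitAlpha (string : String) : Prop :=
  let digits := string.toList.filter (fun c => !PySem.Chars.isalpha c)
  ∃ k ∈ Finset.range digits.length,
    digits.length % 3 = 0 ∧ 3 * k + 3 < digits.length ∧
    (digits.drop (3 * k)).take 3 = digits.drop (digits.length - 3)
instance (string : String) : Decidable (D_splitAlpha string) := by unfold D_splitAlpha; infer_instance

def Spec_splitAlpha (string : String) (out : List (String × List String)) : Prop :=
  ¬ D_splitAlpha string → out = splitAlpha_alt string
instance (string : String) (out : List (String × List String)) : Decidable (Spec_splitAlpha string out) := by
  unfold Spec_splitAlpha; infer_instance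

def pvDiffWitness_splitAlpha : String := "123123"
def pvDiffWitnessOut_splitAlpha : (List (String × List String)) × (List (String × List String)) :=
  ([("course", []), ("code", ["123"])], [("course", []), ("code", ["123", "123"])])

-- ===== CLAIM =====
def Claim_unchanged_splitAlpha : Prop :=
  ∀ (string : String), Dom_splitAlpha string → Spec_splitAlpha string (splitAlpha string)
def Claim_changed_splitAlpha : Prop :=
  Dom_splitAlpha (pvDiffWitness_splitAlpha) ∧ D_splitAlpha (pvDiffWitness_splitAlpha) ∧
  splitAlpha (pvDiffWitness_splitAlpha) = pvDiffWitnessOut_splitAlpha.1 ∧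
  splitAlpha_alt (pvDiffWitness_splitAlpha) = pvDiffWitnessOut_splitAlpha.2 ∧
  pvDiffWitnessOut_splitAlpha.1 ≠ pvDiffWitnessOut_splitAlpha.2
def Claim_exact_splitAlpha : Prop :=
  ∀ (string : String), Dom_splitAlpha string → D_splitAlpha string →
    splitAlpha string ≠ splitAlpha_alt string

-- ===== LEMMAS AND PROOFS =====

-- A's loop, characterized component by component (left recursion over the characters)
def coursesF : List Char → List Char → List (List Char)
  | [], _ => []
  | c :: cs, al =>
    if PySem.Chars.isalpha c then coursesF cs (al ++ [c])
    else if al ≠ [] then al :: coursesF cs [] else coursesF cs []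

def trailF : List Char → List Char → List Char
  | [], al => al
  | c :: cs, al => if PySem.Chars.isalpha c then trailF cs (al ++ [c]) else trailF cs []

def codesF : List Char → List Char → List (List Char)
  | [], _ => []
  | c :: cs, im =>
    if PySem.Chars.isalpha c then codesF cs im
    else if im.length ≥ 3 then im :: codesF cs [c] else codesF cs (im ++ [c])

def intF : List Char → List Char → List Char
  | [], im => im
  | c :: cs, im =>
    if PySem.Chars.isalpha c then intF cs im
    else if im.length ≥ 3 then intF cs [c] else intF cs (im ++ [c])

lemma foldA_eq (cs : List Char) : ∀ (C K : List (List Char)) (al im : List Char),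
    cs.foldl pvStepA (C, K, al, im) =
      (C ++ coursesF cs al, K ++ codesF cs im, trailF cs al, intF cs im) := by
  induction cs with
  | nil => intro C K al im; simp [coursesF, codesF, trailF, intF]
  | cons c cs ih =>
    intro C K al im
    by_cases hp : PySem.Chars.isalpha c
    · simp [pvStepA, hp, coursesF, codesF, trailF, intF, ih]
    · by_cases hal : al = []
      · by_cases him : im.length ≥ 3 <;>
          simp [pvStepA, hp, hal, him, coursesF, codesF, trailF, intF, ih]
      · by_cases him : im.length ≥ 3 <;>
          simp [pvStepA, hp, hal, him, coursesF, codesF, trailF, intF, ih, List.append_assoc]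

-- B's index-slicing loop computes exactly A's flushed letter runs
lemma foldB_eq (cs : List Char) (l : List Char) : ∀ (j : ℕ) (C : List (List Char)) (al : List Char),
    cs.drop j = l → (cs.take j).drop (j - al.length) = al → al.length ≤ j →
    ((PySem.List.enumerate l (j : Int)).foldl (pvStepB cs) (C, ((j - al.length : ℕ) : Int))).1
      = C ++ coursesF l al := by
  induction l with
  | nil => intro j C al _ _ _; simp [PySem.List.enumerate_nil, coursesF]
  | cons c l ih =>
    intro j C al hdrop htake hle
    have hj : j < cs.length := by
      by_contra h
      rw [List.drop_eq_nil_of_le (by omega)] at hdrop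
      exact (List.cons_ne_nil c l) hdrop.symm
    have hget : cs[j]? = some c := by
      have h0 : (cs.drop j)[0]? = some c := by rw [hdrop]; rfl
      simpa [List.getElem?_drop] using h0
    have hdrop' : cs.drop (j + 1) = l := by
      have h1 : cs.drop (j + 1) = (cs.drop j).drop 1 := by rw [List.drop_drop]
      rw [h1, hdrop]; rfl
    have htakesucc : cs.take (j + 1) = cs.take j ++ [c] := by
      rw [List.take_add_one, hget]; rfl
    rw [PySem.List.enumerate_cons]
    have hidx : ((j : Int) + 1) = (((j + 1 : ℕ)) : Int) := by push_cast; ring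
    by_cases hp : PySem.Chars.isalpha c
    · have hstep : pvStepB cs (C, ((j - al.length : ℕ) : Int)) ((j : Int), c)
          = (C, ((j - al.length : ℕ) : Int)) := by
        simp [pvStepB, hp]
      rw [List.foldl_cons, hstep]
      have htake' : (cs.take (j + 1)).drop ((j + 1) - (al ++ [c]).length) = al ++ [c] := by
        rw [htakesucc]
        have hm1 : (j + 1) - (al ++ [c]).length = j - al.length := by
          simp only [List.length_append, List.length_cons, List.length_nil]; omega
        rw [hm1, List.drop_append_of_le_length (by rw [List.length_take]; omega), htake]
      have hm : (j + 1) - (al ++ [c]).length = j - al.length := by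
        simp only [List.length_append, List.length_cons, List.length_nil]; omega
      have hIH := ih (j + 1) C (al ++ [c]) hdrop' htake'
        (by simp only [List.length_append, List.length_cons, List.length_nil]; omega)
      rw [hm] at hIH
      rw [hidx, hIH]
      simp [coursesF, hp]
    · have hslice : PySem.List.slice cs (some ((j - al.length : ℕ) : Int)) (some ((j : ℕ) : Int))
          = al := by
        rw [PySem.List.slice_natCast, ← List.drop_take, htake]
      have hstep : pvStepB cs (C, ((j - al.length : ℕ) : Int)) ((j : Int), c)
          = ((if al ≠ [] then C ++ [al] else C), (j : Int) + 1) := by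
        by_cases hal : al = []
        · subst hal
          simp only [pvStepB, hp]
          simp
        · have hpos : 0 < al.length := List.length_pos_of_ne_nil hal
          simp only [pvStepB, hp]
          have h2 : (((j - al.length : ℕ) : Int) < (j : Int)) := by
            have h3 : j - al.length < j := by omega
            exact_mod_cast h3
          simp [h2, hslice, hal]
      rw [List.foldl_cons, hstep]
      have hIH := ih (j + 1) (if al ≠ [] then C ++ [al] else C) [] hdrop'
        (by apply List.drop_eq_nil_of_le; simp) (by simp)
      simp only [List.length_nil, Nat.sub_zero] at hIH
      rw [hidx, hIH]
      by_cases hal : al = [] <;> simp [coursesF, hp, hal]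

-- chunk-of-3 recursion and its characterizations
def chunk3 : List Char → List (List Char)
  | [] => []
  | c :: S => (c :: S.take 2) :: chunk3 (S.drop 2)
termination_by S => S.length
decreasing_by simp

lemma chunk3_nil : chunk3 [] = [] := by simp [chunk3]

lemma chunk3_cons (c : Char) (S : List Char) :
    chunk3 (c :: S) = ((c :: S).take 3) :: chunk3 ((c :: S).drop 3) := by
  rw [chunk3]; rfl

lemma chunk3_mem_ne_nil_aux (n : ℕ) : ∀ S : List Char, S.length ≤ n → ∀ x ∈ chunk3 S, x ≠ [] := by
  induction n with
  | zero =>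
    intro S hS
    have : S = [] := by cases S <;> simp_all
    subst this; simp [chunk3_nil]
  | succ n ih =>
    intro S hS x hx
    cases S with
    | nil => simp [chunk3_nil] at hx
    | cons c S =>
      rw [chunk3_cons] at hx
      rcases List.mem_cons.mp hx with h | h
      · simp [h]
      · exact ih ((c :: S).drop 3) (by simp at hS ⊢; omega) x h

lemma chunk3_mem_ne_nil (S : List Char) : ∀ x ∈ chunk3 S, x ≠ [] :=
  chunk3_mem_ne_nil_aux S.length S le_rfl

lemma chunk3_nil_iff (S : List Char) : chunk3 S = [] ↔ S = [] := by
  cases S with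
  | nil => simp [chunk3_nil]
  | cons c S => rw [chunk3_cons]; simp

lemma chunksAux_eq (n : ℕ) : ∀ S : List Char, S.length ≤ n →
    (List.range ((S.length + 2) / 3)).map (fun k => (S.drop (3 * k)).take 3) = chunk3 S := by
  induction n with
  | zero => intro S hS; have : S = [] := by cases S <;> simp_all
            subst this; simp [chunk3_nil]
  | succ n ih =>
    intro S hS
    cases S with
    | nil => simp [chunk3_nil]
    | cons c S =>
      have hcnt : ((c :: S).length + 2) / 3 = (((c :: S).drop 3).length + 2) / 3 + 1 := by
        simp; omega
      rw [hcnt, List.range_succ_eq_map, List.map_cons, List.map_map]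
      rw [chunk3_cons]
      refine congrArg₂ List.cons (by simp) ?_
      · rw [← ih ((c :: S).drop 3) (by simp at hS ⊢; omega)]
        apply List.map_congr_left
        intro k hk
        show List.take 3 (List.drop (3 * (k + 1)) (c :: S)) = List.take 3 (List.drop (3 * k) ((c :: S).drop 3))
        rw [List.drop_drop]
        congr 2
        omega

lemma chunksB_eq (S : List Char) :
    (PySem.List.pyRange 0 (S.length : Int) 3).map
      (fun i => PySem.List.slice S (some i) (some (i + 3))) = chunk3 S := by
  rw [PySem.List.pyRange_of_pos 0 (S.length : Int) (by norm_num), List.map_map]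
  have hcnt : (if (0 : Int) < (S.length : Int) then (((S.length : Int) - 0 + 3 - 1) / 3).toNat else 0)
      = (S.length + 2) / 3 := by
    by_cases h : 0 < S.length
    · rw [if_pos (by exact_mod_cast h)]
      omega
    · have h0 : S.length = 0 := by omega
      simp [h0]
  rw [hcnt, ← chunksAux_eq S.length S le_rfl]
  apply List.map_congr_left
  intro k hk
  have h1 : ((0 : Int) + 3 * (k : Int)) = ((3 * k : ℕ) : Int) := by push_cast; ring
  show PySem.List.slice S (some ((0 : Int) + 3 * (k : Int))) (some ((0 : Int) + 3 * (k : Int) + 3))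
      = List.take 3 (List.drop (3 * k) S)
  rw [h1]
  simpa using PySem.List.slice_natCast_add S (3 * k) 3

def chunkLoop : List Char → List Char → List (List Char) × List Char
  | [], im => ([], im)
  | c :: S, im =>
    if im.length ≥ 3 then (im :: (chunkLoop S [c]).1, (chunkLoop S [c]).2)
    else chunkLoop S (im ++ [c])

lemma codesF_filter (cs : List Char) : ∀ im : List Char,
    (codesF cs im, intF cs im) = chunkLoop (cs.filter (fun c => !PySem.Chars.isalpha c)) im := by
  induction cs with
  | nil => intro im; simp [codesF, intF, chunkLoop]
  | cons c cs ih =>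
    intro im
    by_cases hp : PySem.Chars.isalpha c
    · simp [codesF, intF, hp, ih]
    · by_cases him : im.length ≥ 3 <;>
        simp [codesF, intF, hp, him, chunkLoop, ← ih]

lemma chunkLoop_spec (S : List Char) : ∀ im : List Char, im.length ≤ 3 → im ≠ [] →
    chunkLoop S im = ((chunk3 (im ++ S)).dropLast, (chunk3 (im ++ S)).getLastD []) := by
  induction S with
  | nil =>
    intro im h3 hne
    have : chunk3 im = [im] := by
      cases im with
      | nil => simp at hne
      | cons d im' =>
        rw [chunk3_cons]
        have ht : (d :: im').take 3 = d :: im' := List.take_of_length_le (by simpa using h3)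
        have hd : (d :: im').drop 3 = [] := List.drop_of_length_le (by simpa using h3)
        rw [ht, hd]; simp [chunk3_nil]
    simp [chunkLoop, this]
  | cons c S ih =>
    intro im h3 hne
    by_cases him : im.length ≥ 3
    · have hlen : im.length = 3 := by omega
      have hch : chunk3 (im ++ c :: S) = im :: chunk3 (c :: S) := by
        cases im with
        | nil => simp at hne
        | cons d im' =>
          rw [show ((d :: im') ++ c :: S) = d :: (im' ++ c :: S) from rfl, chunk3_cons]
          congr 1
          · rw [show (d :: (im' ++ c :: S)) = ((d :: im') ++ (c :: S)) from rfl]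
            exact List.take_left' hlen
          · rw [show (d :: (im' ++ c :: S)) = ((d :: im') ++ (c :: S)) from rfl]
            congr 1
            exact List.drop_left' hlen
      have hne2 : chunk3 (c :: S) ≠ [] := by simp [chunk3_nil_iff]
      rw [hch]
      have h1 : (im :: chunk3 (c :: S)).dropLast = im :: (chunk3 (c :: S)).dropLast := by
        exact List.dropLast_cons_of_ne_nil hne2
      have h2 : (im :: chunk3 (c :: S)).getLastD [] = (chunk3 (c :: S)).getLastD [] := by
        cases h : chunk3 (c :: S) with
        | nil => exact absurd h hne2
        | cons a Y => simp [List.getLastD]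
      rw [h1, h2]
      simp only [chunkLoop, if_pos him]
      rw [ih [c] (by simp) (by simp)]
      simp
    · have : chunkLoop (c :: S) im = chunkLoop S (im ++ [c]) := by
        simp [chunkLoop, him]
      rw [this, ih (im ++ [c]) (by simp; omega) (by simp)]
      simp

-- A's (codes, integer) pair after the loop, as dropLast/last of the chunking
lemma codes_int_eq (cs : List Char) :
    (codesF cs [], intF cs []) =
      ((chunk3 (cs.filter (fun c => !PySem.Chars.isalpha c))).dropLast,
       (chunk3 (cs.filter (fun c => !PySem.Chars.isalpha c))).getLastD []) := by
  rw [codesF_filter cs []]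
  cases hF : cs.filter (fun c => !PySem.Chars.isalpha c) with
  | nil => simp [chunkLoop, chunk3_nil]
  | cons c S =>
    rw [show (chunkLoop (c :: S) [] = chunkLoop S [c]) from by simp [chunkLoop]]
    rw [chunkLoop_spec S [c] (by simp) (by simp)]
    rfl

-- the D_ condition, restated through chunk3
lemma mem_dropLast_chunk3 (S : List Char) :
    ((chunk3 S).getLastD [] ∈ (chunk3 S).dropLast) ↔
      (∃ k, k < S.length ∧ S.length % 3 = 0 ∧ 3 * k + 3 < S.length ∧
        (S.drop (3 * k)).take 3 = S.drop (S.length - 3)) := by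
  rw [← chunksAux_eq S.length S le_rfl]
  set n := S.length with hn
  by_cases hm0 : (n + 2) / 3 = 0
  · have hn0 : n = 0 := by omega
    rw [hm0]
    simp
    omega
  · have hm1 : 1 ≤ (n + 2) / 3 := by omega
    have hn1 : 1 ≤ n := by omega
    set m := (n + 2) / 3 with hmdef
    have hsplit : List.range m = List.range (m - 1) ++ [m - 1] := by
      have : m = (m - 1) + 1 := by omega
      rw [this, List.range_succ]
      congr 1
    rw [hsplit, List.map_append, List.map_cons, List.map_nil]
    rw [List.dropLast_concat]
    have hlastD : ((List.range (m - 1)).map (fun k => (S.drop (3 * k)).take 3)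
        ++ [(S.drop (3 * (m - 1))).take 3]).getLastD []
        = (S.drop (3 * (m - 1))).take 3 := by
      rw [List.getLastD_eq_getLast?, List.getLast?_concat]
      rfl
    rw [hlastD]
    constructor
    · intro hmem
      rcases List.mem_map.mp hmem with ⟨k, hk, hfk⟩
      have hkm : k < m - 1 := List.mem_range.mp hk
      have hm2 : 2 ≤ m := by omega
      have hn4 : 4 ≤ n := by omega
      have hk3 : 3 * k + 4 ≤ n := by omega
      have hlenk : ((S.drop (3 * k)).take 3).length = 3 := by
        simp [hn.symm]; omega
      have hlenm : ((S.drop (3 * (m - 1))).take 3).length = n - 3 * (m - 1) := by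
        simp [hn.symm]; omega
      have hleneq := congrArg List.length hfk
      rw [hlenk, hlenm] at hleneq
      have hmod : n % 3 = 0 := by omega
      have hnm : n = 3 * m := by omega
      refine ⟨k, by omega, hmod, by omega, ?_⟩
      have h3 : 3 * (m - 1) = n - 3 := by omega
      rw [hfk, h3]
      apply List.take_of_length_le
      simp [hn.symm]
      omega
    · rintro ⟨k, hkn, hmod, hk3, hwin⟩
      have hnm : n = 3 * m := by omega
      have hkm : k < m - 1 := by omega
      apply List.mem_map.mpr
      refine ⟨k, List.mem_range.mpr hkm, ?_⟩
      rw [hwin]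
      have h3 : 3 * (m - 1) = n - 3 := by omega
      rw [h3]
      symm
      apply List.take_of_length_le
      simp [hn.symm]
      omega

lemma D_iff (string : String) :
    D_splitAlpha string ↔
      (chunk3 (string.toList.filter (fun c => !PySem.Chars.isalpha c))).getLastD []
        ∈ (chunk3 (string.toList.filter (fun c => !PySem.Chars.isalpha c))).dropLast := by
  rw [mem_dropLast_chunk3]
  unfold D_splitAlpha
  constructor
  · rintro ⟨k, hk, h⟩
    exact ⟨k, Finset.mem_range.mp hk, h⟩
  · rintro ⟨k, hk, h⟩
    exact ⟨k, Finset.mem_range.mpr hk, h⟩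

-- ===== VERDICT (by name: the statements are the Claim_ definitions above) =====
theorem splitAlpha_spec : Claim_unchanged_splitAlpha := by
  intro string _ hD
  unfold splitAlpha splitAlpha_alt
  rw [D_iff] at hD
  simp only []
  set cs := string.toList with hcs
  rw [show (([],[],[],[]) : List (List Char) × List (List Char) × List Char × List Char)
      = (([] : List (List Char)), ([] : List (List Char)), ([] : List Char), ([] : List Char)) from rfl]
  rw [foldA_eq cs [] [] [] []]
  dsimp only
  simp only [List.nil_append]
  -- courses agree
  have hcourses : ((PySem.List.enumerate cs 0).foldl (pvStepB cs) ([], 0)).1 = coursesF cs [] := by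
    have := foldB_eq cs cs 0 [] [] (by simp) (by simp) (by simp)
    simpa using this
  -- codes agree
  set digits := cs.filter (fun c => !PySem.Chars.isalpha c) with hdig
  have hK : codesF cs [] = (chunk3 digits).dropLast := congrArg Prod.fst (codes_int_eq cs)
  have hI : intF cs [] = (chunk3 digits).getLastD [] := congrArg Prod.snd (codes_int_eq cs)
  rw [chunksB_eq, hcourses, hK, hI]
  by_cases hnil : chunk3 digits = []
  · simp [hnil]
  · have hlast_ne : (chunk3 digits).getLastD [] ≠ [] := by
      rw [List.getLastD_eq_getLast?, List.getLast?_eq_some_getLast hnil]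
      exact chunk3_mem_ne_nil digits _ (List.getLast_mem hnil)
    have hnotmem : (chunk3 digits).getLastD [] ∉ (chunk3 digits).dropLast := hD
    rw [if_pos ⟨hlast_ne, hnotmem⟩]
    rw [List.getLastD_eq_getLast?, List.getLast?_eq_some_getLast hnil]
    simp only [Option.getD_some]
    rw [List.dropLast_append_getLast hnil]

theorem splitAlpha_changed : Claim_changed_splitAlpha := by
  unfold Claim_changed_splitAlpha; decide

theorem splitAlpha_tight : Claim_exact_splitAlpha := by
  intro string _ hD heq
  rw [D_iff] at hD
  set cs := string.toList with hcs
  set digits := cs.filter (fun c => !PySem.Chars.isalpha c) with hdig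
  have hdne : (chunk3 digits).dropLast ≠ [] := List.ne_nil_of_mem hD
  have hnil : chunk3 digits ≠ [] := by
    intro h; rw [h] at hdne; simp at hdne
  -- extract the "code" components
  have hA : splitAlpha string =
      [("course", (coursesF cs []).map String.ofList),
       ("code", ((chunk3 digits).dropLast).map String.ofList)] := by
    unfold splitAlpha
    simp only []
    rw [show (([],[],[],[]) : List (List Char) × List (List Char) × List Char × List Char)
        = (([] : List (List Char)), ([] : List (List Char)), ([] : List Char), ([] : List Char)) from rfl]
    rw [foldA_eq cs [] [] [] []]
    dsimp only
    simp only [List.nil_append]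
    have hK : codesF cs [] = (chunk3 digits).dropLast := congrArg Prod.fst (codes_int_eq cs)
    have hI : intF cs [] = (chunk3 digits).getLastD [] := congrArg Prod.snd (codes_int_eq cs)
    rw [hK, hI, if_neg]
    intro ⟨_, hnm⟩
    exact hnm hD
  have hB : splitAlpha_alt string =
      [("course", (((PySem.List.enumerate cs 0).foldl (pvStepB cs) ([], 0)).1).map String.ofList),
       ("code", (chunk3 digits).map String.ofList)] := by
    unfold splitAlpha_alt
    simp only []
    rw [chunksB_eq]
  rw [hA, hB] at heq
  have hcode : ((chunk3 digits).dropLast).map String.ofList = (chunk3 digits).map String.ofList := by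
    have h2 := (List.cons_eq_cons.mp heq).2
    have h3 := (List.cons_eq_cons.mp h2).1
    exact congrArg Prod.snd h3
  have hlen := congrArg List.length hcode
  simp [List.length_dropLast] at hlen
  have : 0 < (chunk3 digits).length := List.length_pos_of_ne_nil hnil
  omega
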